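-- pv_equiv track=rewrite | github.com/ITherso/monolith-test | evasion/web_shell.py | _string_concat
-- ===== SOURCE A (Python) =====
-- def _string_concat(payload: str, language: str) -> str:
--     """Break strings into concatenated parts"""
--     if language == "php":
--         # Find and split function names
--         funcs = ['eval', 'exec', 'system', 'passthru', 'shell_exec']
--
--         for func in funcs:
--             if func in payload:
--                 parts = [func[:len(func)//2], func[len(func)//2:]]
--                 replacement = f"('{parts[0]}'.'{parts[1]}')"
--                 payload = payload.replace(f"'{func}'", replacement)
--                 payload = payload.replace(f'"{func}"', replacement)
--
--         return payload
--
--     return payload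
-- ===== SOURCE B (Python) =====
-- def _string_concat(payload: str, language: str) -> str:
--     """Break quoted PHP function names into concatenated parts, one left-to-right pass."""
--     if language != "php":
--         return payload
--     names = ("eval", "exec", "system", "passthru", "shell_exec")
--     out = []
--     i = 0
--     n = len(payload)
--     while i < n:
--         ch = payload[i]
--         rep = None
--         if ch == "'" or ch == '"':
--             for name in names:
--                 if payload.startswith(name + ch, i + 1):
--                     h = len(name) // 2
--                     rep = f"('{name[:h]}'.'{name[h:]}')"
--                     i += len(name) + 2
--                     break
--         if rep is None:
--             out.append(ch)
--             i += 1
--         else: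
--             out.append(rep)
--     return "".join(out)
-- ===== Notes on version B (the rewrite author's own statement) =====
-- stated objective: alternative
-- what changed: Replaces the five-function loop of global str.replace passes by a single left-to-right scan that emits each quoted function name split in two as it is met; Pre_ excludes payloads where two quoted names share a quote character ('eval'exec'), a corner where A's function-priority order and B's leftmost-first order are both defensible and give different results.
-- outside the precondition, e.g. on _string_concat("'exec'eval'", 'php'): A returns "'exec('ev'.'al')", B returns "('ex'.'ec')eval'"
import Mathlib
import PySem

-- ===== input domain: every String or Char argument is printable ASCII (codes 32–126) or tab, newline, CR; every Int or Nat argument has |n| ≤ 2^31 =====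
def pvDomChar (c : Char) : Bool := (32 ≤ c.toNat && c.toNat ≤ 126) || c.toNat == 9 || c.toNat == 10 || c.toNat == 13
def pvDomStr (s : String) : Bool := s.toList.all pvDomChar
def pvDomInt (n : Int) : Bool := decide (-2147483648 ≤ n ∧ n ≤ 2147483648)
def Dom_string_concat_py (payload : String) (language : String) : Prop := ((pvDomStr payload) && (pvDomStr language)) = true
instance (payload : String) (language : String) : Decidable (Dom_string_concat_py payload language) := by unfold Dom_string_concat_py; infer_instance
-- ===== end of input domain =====

-- B replaces A's five global str.replace passes by one left-to-right scan (objective: alternative, same cost).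

-- ===== PORT A =====
-- one iteration of A's 'for func in funcs' loop body (strings as char lists)
def pvStepA (s func : List Char) : List Char :=
  if PySem.Chars.isIn func s then
    -- parts = [func[:len(func)//2], func[len(func)//2:]]  (len//2 on Nat: exact, len ≥ 0)
    let half := func.length / 2
    let p0 := PySem.List.slice func none (some (half : Int))
    let p1 := PySem.List.slice func (some (half : Int)) none
    -- replacement = f"('{parts[0]}'.'{parts[1]}')"
    let repl := ['(', '\''] ++ p0 ++ ['\'', '.', '\''] ++ p1 ++ ['\'', ')']
    let s1 := PySem.Chars.replace s ('\'' :: func ++ ['\'']) repl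
    PySem.Chars.replace s1 ('"' :: func ++ ['"']) repl
  else s

def string_concat_py (payload : String) (language : String) : String :=
  if language == "php" then
    String.ofList (((["eval", "exec", "system", "passthru", "shell_exec"] : List String).map
      String.toList).foldl pvStepA payload.toList)
  else payload

-- ===== PORT B =====
def pvNamesL : List (List Char) :=
  ["eval".toList, "exec".toList, "system".toList, "passthru".toList, "shell_exec".toList]

-- rep = f"('{name[:h]}'.'{name[h:]}')" with h = len(name)//2
def pvRepl (nm : List Char) : List Char :=
  let h := nm.length / 2
  '(' :: '\'' :: nm.take h ++ '\'' :: '.' :: '\'' :: nm.drop h ++ ['\'', ')']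

-- the scanning while-loop of B: one pass, emitting either the split replacement or the char
def pvScan (s : List Char) : List Char :=
  match s with
  | [] => []
  | c :: cs =>
    if c = '\'' ∨ c = '"' then
      match pvNamesL.find? (fun nm => (nm ++ [c]).isPrefixOf cs) with
      | some nm => pvRepl nm ++ pvScan (cs.drop (nm.length + 1))
      | none => c :: pvScan cs
    else c :: pvScan cs
termination_by s.length
decreasing_by all_goals (simp; try omega)

def string_concat_py_alt (payload : String) (language : String) : String :=
  if !(language == "php") then payload
  else String.ofList (pvScan payload.toList)

-- ===== PRECONDITION & SPEC =====
-- the 50 overlap words  q ++ f ++ q ++ g ++ q : two quoted names sharing a quote character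
def pvBad : List (List Char) :=
  (['\'', '"'] : List Char).flatMap (fun q =>
    pvNamesL.flatMap (fun f => pvNamesL.map (fun g => q :: f ++ q :: g ++ [q])))

-- Pre_ excludes php payloads containing two quoted function names sharing a quote character
-- (e.g. 'exec'eval'): there A's fixed function-priority replace order and B's left-to-right
-- scan are both defensible readings of an unspecified corner and can give different results.
def Pre_string_concat_py (payload : String) (language : String) : Prop :=
  language = "php" → pvBad.all (fun b => !(PySem.Chars.isIn b payload.toList)) = true
instance (payload : String) (language : String) : Decidable (Pre_string_concat_py payload language) := by
  unfold Pre_string_concat_py; infer_instance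

def pvWitness_string_concat_py : String × String := ("x = 'eval'(\"exec\")", "php")

def Spec_string_concat_py (payload : String) (language : String) (out : String) : Prop :=
  out = string_concat_py_alt payload language
instance (payload : String) (language : String) (out : String) : Decidable (Spec_string_concat_py payload language out) := by
  unfold Spec_string_concat_py; infer_instance

-- ===== CLAIM (what is proved, stated in full; the proofs are below) =====
def Claim_equal_string_concat_py : Prop :=
  ∀ (payload : String) (language : String), Dom_string_concat_py payload language →
    Pre_string_concat_py payload language →
    Spec_string_concat_py payload language (string_concat_py payload language)

-- ===== LEMMAS AND PROOFS =====

-- the ten (quote, name) patterns, paired with their position in A's replacement order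
def pvPats : List ((Char × List Char) × Nat) :=
  [(('\'', "eval".toList), 0), (('"', "eval".toList), 1),
   (('\'', "exec".toList), 2), (('"', "exec".toList), 3),
   (('\'', "system".toList), 4), (('"', "system".toList), 5),
   (('\'', "passthru".toList), 6), (('"', "passthru".toList), 7),
   (('\'', "shell_exec".toList), 8), (('"', "shell_exec".toList), 9)]

def pvPatText (p : Char × List Char) : List Char := p.1 :: p.2 ++ [p.1]

def pvIsPat (p : Char × List Char) (s : List Char) : Bool := (pvPatText p).isPrefixOf s

-- rendering after the first k patterns (in A's order) have been replaced
def pvR (k : Nat) (s : List Char) : List Char :=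
  match s with
  | [] => []
  | c :: cs =>
    match pvPats.find? (fun x => pvIsPat x.1 (c :: cs)) with
    | some x => (if x.2 < k then pvRepl x.1.2 else pvPatText x.1) ++ pvR k ((c :: cs).drop (x.1.2.length + 2))
    | none => c :: pvR k cs
termination_by s.length
decreasing_by all_goals (simp; try omega)

def pvNoOv (s : List Char) : Prop := pvBad.all (fun b => !(PySem.Chars.isIn b s)) = true

-- "no occurrence of p can start strictly inside u, whatever follows u"
def pvNoSpan : List Char → List Char → Bool
  | [], _ => true
  | c :: u, p => !(p.isPrefixOf (c :: u)) && !((c :: u).isPrefixOf p) && pvNoSpan u p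

-- ---- Chars.replace unfolding ----

lemma pvGoZero (old new l acc : List Char) :
    PySem.Chars.replace.go old new 0 l acc = acc.reverse ++ l := by
  simp [PySem.Chars.replace.go]

lemma pvGoNil (old new acc : List Char) (f : Nat) :
    PySem.Chars.replace.go old new (f + 1) [] acc = acc.reverse := by
  simp [PySem.Chars.replace.go]

lemma pvGoCons (old new acc : List Char) (f : Nat) (c : Char) (t : List Char) :
    PySem.Chars.replace.go old new (f + 1) (c :: t) acc =
      if old.isPrefixOf (c :: t) then
        PySem.Chars.replace.go old new f ((c :: t).drop old.length) (new.reverse ++ acc)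
      else PySem.Chars.replace.go old new f t (c :: acc) := by
  simp [PySem.Chars.replace.go]

lemma pvGoNilAll (old new acc : List Char) (fuel : Nat) :
    PySem.Chars.replace.go old new fuel [] acc = acc.reverse := by
  cases fuel with
  | zero => simp [pvGoZero]
  | succ f => simp [pvGoNil]

lemma pvGoAcc (old new : List Char) : ∀ (fuel : Nat) (l acc : List Char),
    PySem.Chars.replace.go old new fuel l acc = acc.reverse ++ PySem.Chars.replace.go old new fuel l [] := by
  intro fuel
  induction fuel with
  | zero => intro l acc; simp [pvGoZero]
  | succ f ih =>
    intro l acc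
    cases l with
    | nil => simp [pvGoNil]
    | cons c t =>
      rw [pvGoCons, pvGoCons]
      by_cases h : old.isPrefixOf (c :: t)
      · rw [if_pos h, if_pos h, ih _ (new.reverse ++ acc), ih _ (new.reverse ++ [])]
        simp
      · rw [if_neg h, if_neg h, ih t (c :: acc), ih t (c :: [])]
        simp

lemma pvGoFuel (old new : List Char) (ho : old ≠ []) : ∀ (n : Nat) (l : List Char), l.length ≤ n →
    ∀ (fuel fuel' : Nat), l.length ≤ fuel → l.length ≤ fuel' →
    PySem.Chars.replace.go old new fuel l [] = PySem.Chars.replace.go old new fuel' l [] := by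
  intro n
  induction n with
  | zero =>
    intro l hl fuel fuel' _ _
    have : l = [] := by cases l <;> simp_all
    subst this
    rw [pvGoNilAll, pvGoNilAll]
  | succ n ih =>
    intro l hl fuel fuel' h1 h2
    cases l with
    | nil => rw [pvGoNilAll, pvGoNilAll]
    | cons c t =>
      have holen : 1 ≤ old.length := by
        cases old with
        | nil => exact absurd rfl ho
        | cons _ _ => simp
      cases fuel with
      | zero => simp at h1
      | succ f =>
        cases fuel' with
        | zero => simp at h2
        | succ f' =>
          rw [pvGoCons, pvGoCons]
          by_cases h : old.isPrefixOf (c :: t)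
          · rw [if_pos h, if_pos h, pvGoAcc _ _ f, pvGoAcc _ _ f']
            congr 1
            have hd : ((c :: t).drop old.length).length ≤ t.length := by
              simp [List.length_drop]; omega
            have hn : ((c :: t).drop old.length).length ≤ n := by
              simp at hl; omega
            exact ih _ hn f f' (by simp at h1 ⊢; omega) (by simp at h2 ⊢; omega)
          · rw [if_neg h, if_neg h, pvGoAcc _ _ f, pvGoAcc _ _ f']
            congr 1
            exact ih t (by simp at hl; omega) f f' (by simp at h1; omega) (by simp at h2; omega)

lemma pvReplaceNil (old new : List Char) (ho : old ≠ []) : PySem.Chars.replace [] old new = [] := by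
  have he : old.isEmpty = false := by simp [ho]
  simp [PySem.Chars.replace, he, pvGoNilAll]

lemma pvReplaceEq (old new s : List Char) (ho : old ≠ []) :
    PySem.Chars.replace s old new = PySem.Chars.replace.go old new s.length s [] := by
  have he : old.isEmpty = false := by simp [ho]
  simp [PySem.Chars.replace, he]

lemma pvReplacePos (old new s : List Char) (ho : old ≠ []) (h : old.isPrefixOf s) :
    PySem.Chars.replace s old new = new ++ PySem.Chars.replace (s.drop old.length) old new := by
  cases s with
  | nil =>
    have : old = [] := List.prefix_nil.mp (List.isPrefixOf_iff_prefix.mp h)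
    exact absurd this ho
  | cons c t =>
    rw [pvReplaceEq _ _ _ ho, pvReplaceEq _ _ _ ho]
    rw [List.length_cons, pvGoCons, if_pos h, pvGoAcc]
    simp only [List.reverse_reverse, List.append_nil]
    congr 1
    have hd : ((c :: t).drop old.length).length ≤ t.length := by
      have holen : 1 ≤ old.length := by
        cases old with
        | nil => exact absurd rfl ho
        | cons _ _ => simp
      simp [List.length_drop]; omega
    exact pvGoFuel old new ho _ _ le_rfl t.length _ hd le_rfl

lemma pvReplaceNeg (old new : List Char) (c : Char) (cs : List Char) (ho : old ≠ [])
    (h : ¬ old.isPrefixOf (c :: cs) = true) :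
    PySem.Chars.replace (c :: cs) old new = c :: PySem.Chars.replace cs old new := by
  rw [pvReplaceEq _ _ _ ho, pvReplaceEq _ _ _ ho]
  rw [List.length_cons, pvGoCons, if_neg h, pvGoAcc]
  simp

lemma pvPrefixAppendCases {x a b : List Char} (h : x <+: a ++ b) : x <+: a ∨ a <+: x := by
  induction a generalizing x with
  | nil => exact Or.inr (List.nil_prefix)
  | cons c a' ih =>
    cases x with
    | nil => exact Or.inl (List.nil_prefix)
    | cons d x' =>
      rw [List.cons_append, List.cons_prefix_cons] at h
      obtain ⟨rfl, h2⟩ := h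
      rcases ih h2 with h3 | h3
      · exact Or.inl (List.cons_prefix_cons.mpr ⟨rfl, h3⟩)
      · exact Or.inr (List.cons_prefix_cons.mpr ⟨rfl, h3⟩)

lemma pvReplaceNotInfix (old new s : List Char) (ho : old ≠ []) (h : ¬ old <:+: s) :
    PySem.Chars.replace s old new = s := by
  induction s with
  | nil => exact pvReplaceNil _ _ ho
  | cons c cs ih =>
    have hp : ¬ old.isPrefixOf (c :: cs) = true := by
      intro hc
      exact h (List.isPrefixOf_iff_prefix.mp hc).isInfix
    rw [pvReplaceNeg _ _ _ _ ho hp, ih (fun hc => h (List.infix_cons hc))]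

lemma pvReplaceAppend (old new : List Char) (ho : old ≠ []) :
    ∀ (u : List Char), pvNoSpan u old = true →
    ∀ w, PySem.Chars.replace (u ++ w) old new = u ++ PySem.Chars.replace w old new := by
  intro u
  induction u with
  | nil => intro _ w; simp
  | cons c u' ih =>
    intro hns w
    simp only [pvNoSpan, Bool.and_eq_true, Bool.not_eq_true'] at hns
    obtain ⟨⟨h1, h2⟩, h3⟩ := hns
    have hp : ¬ old.isPrefixOf ((c :: u') ++ w) = true := by
      intro hc
      rcases pvPrefixAppendCases (List.isPrefixOf_iff_prefix.mp hc) with hx | hx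
      · rw [List.isPrefixOf_iff_prefix.mpr hx] at h1; exact absurd h1 (by simp)
      · rw [List.isPrefixOf_iff_prefix.mpr hx] at h2; exact absurd h2 (by simp)
    rw [List.cons_append, pvReplaceNeg _ _ _ _ ho (by simpa using hp), ih h3 w]
    simp

-- ---- uniqueness of the matching pattern ----

lemma pvPatsPrefixEq : ∀ a ∈ pvPats, ∀ b ∈ pvPats,
    (pvPatText a.1).isPrefixOf (pvPatText b.1) = true → a = b := by decide

lemma pvUniq {a b : (Char × List Char) × Nat} {s : List Char}
    (ha : a ∈ pvPats) (hb : b ∈ pvPats)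
    (h1 : pvIsPat a.1 s = true) (h2 : pvIsPat b.1 s = true) : a = b := by
  have p1 : pvPatText a.1 <+: s := List.isPrefixOf_iff_prefix.mp h1
  have p2 : pvPatText b.1 <+: s := List.isPrefixOf_iff_prefix.mp h2
  rcases le_total (pvPatText a.1).length (pvPatText b.1).length with hle | hle
  · exact pvPatsPrefixEq a ha b hb
      (List.isPrefixOf_iff_prefix.mpr (List.prefix_of_prefix_length_le p1 p2 hle))
  · exact (pvPatsPrefixEq b hb a ha
      (List.isPrefixOf_iff_prefix.mpr (List.prefix_of_prefix_length_le p2 p1 hle))).symm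

-- ---- no replacement introduces a new "name ++ [quote]" prefix ----

lemma pvSideH1 : ∀ x ∈ pvPats, ∀ y ∈ pvPats, ∀ i ∈ List.range x.1.2.length,
    ((x.1.2.drop i ++ [x.1.1]).isPrefixOf (pvRepl y.1.2) = false ∧
     (pvRepl y.1.2).isPrefixOf (x.1.2.drop i ++ [x.1.1]) = false ∧
     (x.1.2.drop i ++ [x.1.1]).isPrefixOf (pvPatText y.1) = false ∧
     (pvPatText y.1).isPrefixOf (x.1.2.drop i ++ [x.1.1]) = false) := by decide

lemma pvSideH2 : ∀ x ∈ pvPats, ∀ y ∈ pvPats,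
    ([x.1.1].isPrefixOf (pvRepl y.1.2) = false ∧
     (pvRepl y.1.2).isPrefixOf [x.1.1] = false ∧
     (pvPatText y.1).isPrefixOf [x.1.1] = false) := by decide

lemma pvH {x : (Char × List Char) × Nat} (hx : x ∈ pvPats) :
    ∀ (n : Nat) (t : List Char), t.length ≤ n → ∀ (i : Nat), i ≤ x.1.2.length → ∀ (k : Nat),
      (x.1.2.drop i ++ [x.1.1]) <+: pvR k t → (x.1.2.drop i ++ [x.1.1]) <+: t := by
  intro n
  induction n with
  | zero =>
    intro t ht i hi k h
    have : t = [] := by cases t <;> simp_all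
    subst this
    rw [pvR] at h
    simp at h
  | succ n ih =>
    intro t ht i hi k h
    cases t with
    | nil => rw [pvR] at h; simp at h
    | cons c cs =>
      rw [pvR] at h
      cases hf : pvPats.find? (fun z => pvIsPat z.1 (c :: cs)) with
      | some y =>
        simp only [hf] at h
        have hy : pvIsPat y.1 (c :: cs) = true := by simpa using List.find?_some hf
        have hym := List.mem_of_find?_eq_some hf
        have hpre : pvPatText y.1 <+: (c :: cs) := List.isPrefixOf_iff_prefix.mp hy
        have hcy : y.1.1 = c := by
          have := hpre
          simp only [pvPatText, List.cons_append, List.cons_prefix_cons] at this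
          exact this.1
        rcases Nat.lt_or_ge i x.1.2.length with hilt | hige
        · exfalso
          have hside := pvSideH1 x hx y hym i (List.mem_range.mpr hilt)
          by_cases hk : y.2 < k
          · rw [if_pos hk] at h
            rcases pvPrefixAppendCases h with h1 | h2
            · rw [List.isPrefixOf_iff_prefix.mpr h1] at hside; simp at hside
            · rw [List.isPrefixOf_iff_prefix.mpr h2] at hside; simp at hside
          · rw [if_neg hk] at h
            rcases pvPrefixAppendCases h with h1 | h2
            · rw [List.isPrefixOf_iff_prefix.mpr h1] at hside; simp at hside
            · rw [List.isPrefixOf_iff_prefix.mpr h2] at hside; simp at hside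
        · have hieq : i = x.1.2.length := by omega
          subst hieq
          rw [List.drop_length] at h ⊢
          rw [List.nil_append] at h ⊢
          have hside := pvSideH2 x hx y hym
          by_cases hk : y.2 < k
          · exfalso
            rw [if_pos hk] at h
            rcases pvPrefixAppendCases h with h1 | h2
            · rw [List.isPrefixOf_iff_prefix.mpr h1] at hside; simp at hside
            · rw [List.isPrefixOf_iff_prefix.mpr h2] at hside; simp at hside
          · rw [if_neg hk] at h
            rcases pvPrefixAppendCases h with h1 | h2
            · -- [x.1.1] prefix of the pattern text: quotes agree, done
              have hq : x.1.1 = y.1.1 := by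
                obtain ⟨r, hr⟩ := h1
                have h' := congrArg List.head? hr
                simp [pvPatText] at h'
                exact h'
              rw [hq, hcy]
              exact List.cons_prefix_cons.mpr ⟨rfl, List.nil_prefix⟩
            · exfalso
              rw [List.isPrefixOf_iff_prefix.mpr h2] at hside; simp at hside
      | none =>
        simp only [hf] at h
        rcases Nat.lt_or_ge i x.1.2.length with hilt | hige
        · have hw : x.1.2.drop i ++ [x.1.1] = x.1.2[i] :: (x.1.2.drop (i + 1) ++ [x.1.1]) := by
            rw [← List.cons_append, List.getElem_cons_drop]
          rw [hw] at h ⊢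
          rw [List.cons_prefix_cons] at h
          obtain ⟨hc1, hc2⟩ := h
          exact List.cons_prefix_cons.mpr
            ⟨hc1, ih cs (by simp at ht; omega) (i + 1) (by omega) k hc2⟩
        · have hieq : i = x.1.2.length := by omega
          subst hieq
          rw [List.drop_length] at h ⊢
          rw [List.nil_append] at h ⊢
          rw [List.cons_prefix_cons] at h
          exact List.cons_prefix_cons.mpr ⟨h.1, List.nil_prefix⟩

-- ---- the key step: one replace pass advances the render index ----

lemma pvNoOvSuffix {s t : List Char} (h : t <:+ s) (hs : pvNoOv s) : pvNoOv t := by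
  simp only [pvNoOv, List.all_eq_true] at hs ⊢
  intro b hb
  have h1 : PySem.Chars.isIn b s = false := by simpa using hs b hb
  have h2 : ¬ b <:+: s := (PySem.Chars.isIn_eq_false_iff _ _).mp h1
  by_contra hcon
  simp only [Bool.not_eq_true'] at hcon
  rw [Bool.not_eq_false] at hcon
  exact h2 (((PySem.Chars.isIn_iff_infix _ _).mp hcon).trans h.isInfix)

-- ---- the key step: one replace pass advances the render index ----

lemma pvSideK1 : ∀ x ∈ pvPats, ∀ y ∈ pvPats, pvNoSpan (pvRepl y.1.2) (pvPatText x.1) = true := by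
  decide

lemma pvSideK2 : ∀ x ∈ pvPats, ∀ y ∈ pvPats, x.2 ≠ y.2 →
    pvNoSpan (y.1.1 :: y.1.2) (pvPatText x.1) = true := by decide

lemma pvSideIdx : ∀ a ∈ pvPats, ∀ b ∈ pvPats, a.2 = b.2 → a = b := by decide

lemma pvSideBad : ∀ x ∈ pvPats, ∀ y ∈ pvPats, x.1.1 = y.1.1 →
    (y.1.1 :: y.1.2 ++ y.1.1 :: x.1.2 ++ [y.1.1]) ∈ pvBad := by decide

lemma pvK {x : (Char × List Char) × Nat} (hx : x ∈ pvPats) :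
    ∀ (n : Nat) (s : List Char), s.length ≤ n → pvNoOv s →
      PySem.Chars.replace (pvR x.2 s) (pvPatText x.1) (pvRepl x.1.2) = pvR (x.2 + 1) s := by
  have hpne : pvPatText x.1 ≠ [] := by simp [pvPatText]
  intro n
  induction n with
  | zero =>
    intro s hs _
    have : s = [] := by cases s <;> simp_all
    subst this
    simp only [pvR]
    exact pvReplaceNil _ _ hpne
  | succ n ih =>
    intro s hs hno
    cases s with
    | nil => simp only [pvR]; exact pvReplaceNil _ _ hpne
    | cons c cs =>
      rw [pvR]
      conv_rhs => rw [pvR]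
      cases hf : pvPats.find? (fun z => pvIsPat z.1 (c :: cs)) with
      | some y =>
        simp only [hf]
        have hy : pvIsPat y.1 (c :: cs) = true := by simpa using List.find?_some hf
        have hym := List.mem_of_find?_eq_some hf
        have hpre : pvPatText y.1 <+: (c :: cs) := List.isPrefixOf_iff_prefix.mp hy
        have hlenpat : (pvPatText y.1).length = y.1.2.length + 2 := by simp [pvPatText]
        have hteq : (c :: cs) = pvPatText y.1 ++ (c :: cs).drop (y.1.2.length + 2) := by
          obtain ⟨r, hr⟩ := hpre
          conv_lhs => rw [← hr]
          congr 1
          rw [← hr, ← hlenpat, List.drop_left]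
        have htlen : ((c :: cs).drop (y.1.2.length + 2)).length ≤ n := by
          simp only [List.length_drop, List.length_cons]
          simp at hs; omega
        have htno : pvNoOv ((c :: cs).drop (y.1.2.length + 2)) :=
          pvNoOvSuffix (List.drop_suffix _ _) hno
        rcases Nat.lt_trichotomy y.2 x.2 with hlt | heq | hgt
        · rw [if_pos hlt, if_pos (by omega)]
          rw [pvReplaceAppend _ _ hpne _ (pvSideK1 x hx y hym)]
          rw [ih _ htlen htno]
        · have hyx : y = x := pvSideIdx y hym x hx heq
          subst hyx
          rw [if_neg (by omega), if_pos (by omega)]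
          rw [pvReplacePos _ _ _ hpne
            (List.isPrefixOf_iff_prefix.mpr (List.prefix_append _ _))]
          congr 1
          rw [List.drop_left]
          exact ih _ htlen htno
        · rw [if_neg (by omega), if_neg (by omega)]
          have hassoc : pvPatText y.1 ++ pvR x.2 ((c :: cs).drop (y.1.2.length + 2)) =
              (y.1.1 :: y.1.2) ++ (y.1.1 :: pvR x.2 ((c :: cs).drop (y.1.2.length + 2))) := by
            simp [pvPatText]
          rw [hassoc, pvReplaceAppend _ _ hpne _ (pvSideK2 x hx y hym (by omega))]
          have hnp : ¬ (pvPatText x.1).isPrefixOf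
              (y.1.1 :: pvR x.2 ((c :: cs).drop (y.1.2.length + 2))) = true := by
            intro hcon
            have hpfx := List.isPrefixOf_iff_prefix.mp hcon
            have hshape : pvPatText x.1 = x.1.1 :: (x.1.2 ++ [x.1.1]) := by simp [pvPatText]
            rw [hshape, List.cons_prefix_cons] at hpfx
            obtain ⟨hq, hrest⟩ := hpfx
            have hrest' : x.1.2.drop 0 ++ [x.1.1] <+: pvR x.2 ((c :: cs).drop (y.1.2.length + 2)) := by
              simpa using hrest
            have hbadt : x.1.2 ++ [x.1.1] <+: (c :: cs).drop (y.1.2.length + 2) := by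
              simpa using pvH hx n _ htlen 0 (by omega) x.2 hrest'
            have hbmem := pvSideBad x hx y hym hq
            have hbpre : (y.1.1 :: y.1.2 ++ y.1.1 :: x.1.2 ++ [y.1.1]) <+: (c :: cs) := by
              rw [hteq]
              obtain ⟨r2, hr2⟩ := hbadt
              refine ⟨r2, ?_⟩
              rw [← hr2]
              simp [pvPatText, hq]
            have hbin : PySem.Chars.isIn (y.1.1 :: y.1.2 ++ y.1.1 :: x.1.2 ++ [y.1.1]) (c :: cs) = true :=
              (PySem.Chars.isIn_iff_infix _ _).mpr hbpre.isInfix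
            simp only [pvNoOv, List.all_eq_true] at hno
            have hc2 := hno _ hbmem
            rw [hbin] at hc2
            simp at hc2
          rw [pvReplaceNeg _ _ _ _ hpne hnp]
          rw [ih _ htlen htno]
          simp [pvPatText]
      | none =>
        simp only [hf]
        have hnp : ¬ (pvPatText x.1).isPrefixOf (c :: pvR x.2 cs) = true := by
          intro hcon
          have hpfx := List.isPrefixOf_iff_prefix.mp hcon
          have hshape : pvPatText x.1 = x.1.1 :: (x.1.2 ++ [x.1.1]) := by simp [pvPatText]
          rw [hshape, List.cons_prefix_cons] at hpfx
          obtain ⟨hq, hrest⟩ := hpfx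
          have hrest' : x.1.2.drop 0 ++ [x.1.1] <+: pvR x.2 cs := by simpa using hrest
          have hcs : x.1.2 ++ [x.1.1] <+: cs := by
            simpa using pvH hx n cs (by simp at hs; omega) 0 (by omega) x.2 hrest'
          have hmatch : pvIsPat x.1 (c :: cs) = true := by
            apply List.isPrefixOf_iff_prefix.mpr
            rw [hshape]
            exact List.cons_prefix_cons.mpr ⟨hq, hcs⟩
          exact absurd hmatch (by simpa using List.find?_eq_none.mp hf x hx)
        rw [pvReplaceNeg _ _ _ _ hpne hnp]
        rw [ih cs (by simp at hs; omega) (pvNoOvSuffix (List.suffix_cons c cs) hno)]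

lemma pvR0 : ∀ (n : Nat) (s : List Char), s.length ≤ n → pvR 0 s = s := by
  intro n
  induction n with
  | zero =>
    intro s hs
    have : s = [] := by cases s <;> simp_all
    subst this; simp [pvR]
  | succ n ih =>
    intro s hs
    cases s with
    | nil => simp [pvR]
    | cons c cs =>
      rw [pvR]
      cases hf : pvPats.find? (fun z => pvIsPat z.1 (c :: cs)) with
      | some y =>
        simp only [hf]
        rw [if_neg (by omega)]
        have hy : pvIsPat y.1 (c :: cs) = true := by simpa using List.find?_some hf
        have hpre : pvPatText y.1 <+: (c :: cs) := List.isPrefixOf_iff_prefix.mp hy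
        have hlenpat : (pvPatText y.1).length = y.1.2.length + 2 := by simp [pvPatText]
        have hteq : (c :: cs) = pvPatText y.1 ++ (c :: cs).drop (y.1.2.length + 2) := by
          obtain ⟨r, hr⟩ := hpre
          conv_lhs => rw [← hr]
          congr 1
          rw [← hr, ← hlenpat, List.drop_left]
        have htlen : ((c :: cs).drop (y.1.2.length + 2)).length ≤ n := by
          simp only [List.length_drop, List.length_cons]
          simp at hs; omega
        rw [ih _ htlen]
        exact hteq.symm
      | none =>
        simp only [hf]
        rw [ih cs (by simp at hs; omega)]

lemma pvSideQ : ∀ a ∈ pvPats, (a.1.1 = '\'' ∨ a.1.1 = '"') := by decide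

lemma pvSideName : ∀ a ∈ pvPats, a.1.2 ∈ pvNamesL := by decide

lemma pvSidePair : ∀ nm ∈ pvNamesL,
    (∃ a ∈ pvPats, a.1 = ('\'', nm)) ∧ (∃ a ∈ pvPats, a.1 = ('"', nm)) := by decide

lemma pvSideIdx10 : ∀ a ∈ pvPats, a.2 < 10 := by decide

lemma pvPairMem {c : Char} {nm : List Char} (hq : c = '\'' ∨ c = '"') (hnm : nm ∈ pvNamesL) :
    ∃ a ∈ pvPats, a.1 = (c, nm) := by
  rcases hq with h | h
  · obtain ⟨a, ham, hae⟩ := (pvSidePair nm hnm).1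
    exact ⟨a, ham, by rw [hae, h]⟩
  · obtain ⟨a, ham, hae⟩ := (pvSidePair nm hnm).2
    exact ⟨a, ham, by rw [hae, h]⟩

lemma pvPairMatch {c : Char} {nm : List Char} {cs : List Char} {a : (Char × List Char) × Nat}
    (hae : a.1 = (c, nm)) (hnm : (nm ++ [c]).isPrefixOf cs = true) :
    pvIsPat a.1 (c :: cs) = true := by
  apply List.isPrefixOf_iff_prefix.mpr
  rw [show pvPatText a.1 = a.1.1 :: (a.1.2 ++ [a.1.1]) by simp [pvPatText], hae]
  exact List.cons_prefix_cons.mpr ⟨rfl, List.isPrefixOf_iff_prefix.mp hnm⟩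

lemma pvScanR10 : ∀ (n : Nat) (s : List Char), s.length ≤ n → pvScan s = pvR 10 s := by
  intro n
  induction n with
  | zero =>
    intro s hs
    have : s = [] := by cases s <;> simp_all
    subst this; simp [pvScan, pvR]
  | succ n ih =>
    intro s hs
    cases s with
    | nil => simp [pvScan, pvR]
    | cons c cs =>
      rw [pvScan]
      conv_rhs => rw [pvR]
      cases hf : pvPats.find? (fun z => pvIsPat z.1 (c :: cs)) with
      | some y =>
        simp only [hf]
        have hy : pvIsPat y.1 (c :: cs) = true := by simpa using List.find?_some hf
        have hym := List.mem_of_find?_eq_some hf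
        have hpre : pvPatText y.1 <+: (c :: cs) := List.isPrefixOf_iff_prefix.mp hy
        have hcy : y.1.1 = c := by
          have h' := hpre
          simp only [pvPatText, List.cons_append, List.cons_prefix_cons] at h'
          exact h'.1
        have hq : c = '\'' ∨ c = '"' := by
          rcases pvSideQ y hym with h | h
          · exact Or.inl (hcy ▸ h)
          · exact Or.inr (hcy ▸ h)
        rw [if_pos hq]
        have htail : (y.1.2 ++ [c]).isPrefixOf cs = true := by
          apply List.isPrefixOf_iff_prefix.mpr
          have h' := hpre
          rw [show pvPatText y.1 = y.1.1 :: (y.1.2 ++ [y.1.1]) by simp [pvPatText], hcy,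
            List.cons_prefix_cons] at h'
          exact h'.2
        cases hg : pvNamesL.find? (fun nm => (nm ++ [c]).isPrefixOf cs) with
        | none =>
          exact absurd htail (by simpa using List.find?_eq_none.mp hg y.1.2 (pvSideName y hym))
        | some nm =>
          simp only [hg]
          have hnm : (nm ++ [c]).isPrefixOf cs = true := by simpa using List.find?_some hg
          have hnmm : nm ∈ pvNamesL := List.mem_of_find?_eq_some hg
          obtain ⟨a, ham, hae⟩ := pvPairMem hq hnmm
          have hay : a = y := pvUniq ham hym (pvPairMatch hae hnm) hy
          have hnmy : nm = y.1.2 := by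
            have := hae
            rw [hay] at this
            exact (congrArg Prod.snd this).symm
          rw [if_pos (pvSideIdx10 y hym)]
          have hdrop : (c :: cs).drop (y.1.2.length + 2) = cs.drop (y.1.2.length + 1) := by
            rw [show y.1.2.length + 2 = (y.1.2.length + 1) + 1 from rfl, List.drop_succ_cons]
          rw [hnmy, hdrop]
          congr 1
          apply ih
          simp only [List.length_drop]
          simp at hs; omega
      | none =>
        simp only [hf]
        by_cases hq : c = '\'' ∨ c = '"'
        · rw [if_pos hq]
          cases hg : pvNamesL.find? (fun nm => (nm ++ [c]).isPrefixOf cs) with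
          | some nm =>
            exfalso
            have hnm : (nm ++ [c]).isPrefixOf cs = true := by simpa using List.find?_some hg
            have hnmm : nm ∈ pvNamesL := List.mem_of_find?_eq_some hg
            obtain ⟨a, ham, hae⟩ := pvPairMem hq hnmm
            exact absurd (pvPairMatch hae hnm) (by simpa using List.find?_eq_none.mp hf a ham)
          | none =>
            simp only [hg]
            rw [ih cs (by simp at hs; omega)]
        · rw [if_neg hq]
          rw [ih cs (by simp at hs; omega)]

lemma pvStepAEq (nm s : List Char) (hnm : nm ≠ []) :
    pvStepA s nm = PySem.Chars.replace (PySem.Chars.replace s ('\'' :: nm ++ ['\'']) (pvRepl nm))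
      ('"' :: nm ++ ['"']) (pvRepl nm) := by
  have hrepl : ['(', '\''] ++ PySem.List.slice nm none (some ((nm.length / 2 : Nat) : Int)) ++
      ['\'', '.', '\''] ++ PySem.List.slice nm (some ((nm.length / 2 : Nat) : Int)) none ++
      ['\'', ')'] = pvRepl nm := by
    rw [PySem.List.slice_to_natCast, PySem.List.slice_from_natCast]
    simp [pvRepl]
  by_cases hin : PySem.Chars.isIn nm s = true
  · simp only [pvStepA, hin, if_true]
    rw [hrepl]
  · simp only [pvStepA, hin, Bool.false_eq_true, if_false]
    have hni : ¬ nm <:+: s :=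
      (PySem.Chars.isIn_eq_false_iff _ _).mp (by simpa using hin)
    have hsub1 : nm <:+: ('\'' :: nm ++ ['\'']) := ⟨['\''], ['\''], by simp⟩
    have hsub2 : nm <:+: ('"' :: nm ++ ['"']) := ⟨['"'], ['"'], by simp⟩
    rw [pvReplaceNotInfix _ _ _ (by simp) (fun hcon => hni (hsub1.trans hcon)),
      pvReplaceNotInfix _ _ _ (by simp) (fun hcon => hni (hsub2.trans hcon))]

lemma pvChain (s : List Char) (h : pvNoOv s) :
    ((["eval", "exec", "system", "passthru", "shell_exec"] : List String).map
      String.toList).foldl pvStepA s = pvScan s := by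
  have e0 : s = pvR 0 s := (pvR0 s.length s le_rfl).symm
  have k0 := pvK (x := (('\'', "eval".toList), 0)) (by decide) s.length s le_rfl h
  have k1 := pvK (x := (('"', "eval".toList), 1)) (by decide) s.length s le_rfl h
  have k2 := pvK (x := (('\'', "exec".toList), 2)) (by decide) s.length s le_rfl h
  have k3 := pvK (x := (('"', "exec".toList), 3)) (by decide) s.length s le_rfl h
  have k4 := pvK (x := (('\'', "system".toList), 4)) (by decide) s.length s le_rfl h
  have k5 := pvK (x := (('"', "system".toList), 5)) (by decide) s.length s le_rfl h
  have k6 := pvK (x := (('\'', "passthru".toList), 6)) (by decide) s.length s le_rfl h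
  have k7 := pvK (x := (('"', "passthru".toList), 7)) (by decide) s.length s le_rfl h
  have k8 := pvK (x := (('\'', "shell_exec".toList), 8)) (by decide) s.length s le_rfl h
  have k9 := pvK (x := (('"', "shell_exec".toList), 9)) (by decide) s.length s le_rfl h
  simp only [pvPatText] at k0 k1 k2 k3 k4 k5 k6 k7 k8 k9
  simp only [List.map_cons, List.map_nil, List.foldl_cons, List.foldl_nil]
  rw [pvStepAEq _ _ (by decide), pvStepAEq _ _ (by decide), pvStepAEq _ _ (by decide),
    pvStepAEq _ _ (by decide), pvStepAEq _ _ (by decide)]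
  rw [show PySem.Chars.replace s ('\'' :: "eval".toList ++ ['\'']) (pvRepl "eval".toList) =
        pvR 1 s by conv_lhs => rw [e0]
                   exact k0]
  rw [k1, k2, k3, k4, k5, k6, k7, k8, k9]
  exact (pvScanR10 s.length s le_rfl).symm

-- ===== VERDICT (by name: the statement is the Claim_ definition above) =====
theorem string_concat_py_spec : Claim_equal_string_concat_py := by
  intro payload language _ hpre
  unfold Spec_string_concat_py string_concat_py string_concat_py_alt
  by_cases hl : language == "php"
  · have hlang : language = "php" := by simpa using hl
    simp only [hl, if_true, Bool.not_true, Bool.false_eq_true, if_false]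
    have h := pvChain payload.toList (hpre hlang)
    rw [h]
  · simp [hl]
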